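-- pv_equiv track=rewrite | github.com/sebitabravo/ManttoAI | backend/app/middleware/audit.py | _get_entity_from_path
-- ===== SOURCE A (Python) =====
-- def _get_entity_from_path(path: str) -> tuple[str, int | None]:
--     """
--     Extrae tipo de entidad y ID desde la ruta.
--
--     Ejemplos:
--     - /api/v1/equipos -> ("equipo", None)
--     - /api/v1/equipos/123 -> ("equipo", 123)
--     - /api/v1/usuarios/456 -> ("usuario", 456)
--     """
--
--     normalized_path = path.rstrip("/") or "/"
--
--     # Mapeo de rutas a entidades
--     path_mapping = {
--         "/api/v1/equipos": "equipo",
--         "/equipos": "equipo",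
--         "/api/v1/usuarios": "usuario",
--         "/usuarios": "usuario",
--         "/api/v1/alertas": "alerta",
--         "/alertas": "alerta",
--         "/api/v1/umbrales": "umbral",
--         "/umbrales": "umbral",
--         "/api/v1/mantenciones": "mantencion",
--         "/mantenciones": "mantencion",
--         "/api/v1/lecturas": "lectura",
--         "/lecturas": "lectura",
--         "/api/v1/predicciones": "prediccion",
--         "/predicciones": "prediccion",
--         "/api/v1/api-keys": "api_key",
--         "/api-keys": "api_key",
--         "/api/v1/reportes": "reporte",
--         "/reportes": "reporte",
--         "/auth": "auth",
--         "/api/v1/auth": "auth",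
--         "/api/v1/iot": "iot",
--     }
--
--     segments = [segment for segment in normalized_path.split("/") if segment]
--
--     # Buscar coincidencia de ruta
--     for route, entity_type in path_mapping.items():
--         route_segments = [segment for segment in route.split("/") if segment]
--         if segments[: len(route_segments)] == route_segments:
--             if len(segments) > len(route_segments):
--                 candidate = segments[len(route_segments)]
--                 try:
--                     return entity_type, int(candidate)
--                 except ValueError:
--                     pass
--
--             return entity_type, None
--
--     return "unknown", None
-- ===== SOURCE B (Python) =====
-- _ROUTES = {
--     "/api/v1/equipos": "equipo",
--     "/equipos": "equipo",
--     "/api/v1/usuarios": "usuario",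
--     "/usuarios": "usuario",
--     "/api/v1/alertas": "alerta",
--     "/alertas": "alerta",
--     "/api/v1/umbrales": "umbral",
--     "/umbrales": "umbral",
--     "/api/v1/mantenciones": "mantencion",
--     "/mantenciones": "mantencion",
--     "/api/v1/lecturas": "lectura",
--     "/lecturas": "lectura",
--     "/api/v1/predicciones": "prediccion",
--     "/predicciones": "prediccion",
--     "/api/v1/api-keys": "api_key",
--     "/api-keys": "api_key",
--     "/api/v1/reportes": "reporte",
--     "/reportes": "reporte",
--     "/auth": "auth",
--     "/api/v1/auth": "auth",
--     "/api/v1/iot": "iot",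
-- }
--
-- # Index keyed by the tuple of each route's non-empty segments (lengths 3 and 1 only).
-- _INDEX = {
--     tuple(seg for seg in route.split("/") if seg): entity
--     for route, entity in _ROUTES.items()
-- }
--
--
-- def _get_entity_from_path(path: str) -> tuple[str, int | None]:
--     segments = [seg for seg in path.rstrip("/").split("/") if seg]
--     for key in (tuple(segments[:3]), tuple(segments[:1])):
--         entity = _INDEX.get(key)
--         if entity is not None:
--             k = len(key)
--             if len(segments) > k:
--                 try:
--                     return entity, int(segments[k])
--                 except ValueError:
--                     pass
--             return entity, None
--     return "unknown", None
-- ===== Notes on version B (the rewrite author's own statement) =====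
-- stated objective: idiomatic
-- what changed: Replaces the per-call scan over all 21 routes (each with a split and a prefix comparison) by an index dict built once, keyed by each route's non-empty segment tuple, and two direct lookups (segments[:3], then segments[:1]).
import Mathlib
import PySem

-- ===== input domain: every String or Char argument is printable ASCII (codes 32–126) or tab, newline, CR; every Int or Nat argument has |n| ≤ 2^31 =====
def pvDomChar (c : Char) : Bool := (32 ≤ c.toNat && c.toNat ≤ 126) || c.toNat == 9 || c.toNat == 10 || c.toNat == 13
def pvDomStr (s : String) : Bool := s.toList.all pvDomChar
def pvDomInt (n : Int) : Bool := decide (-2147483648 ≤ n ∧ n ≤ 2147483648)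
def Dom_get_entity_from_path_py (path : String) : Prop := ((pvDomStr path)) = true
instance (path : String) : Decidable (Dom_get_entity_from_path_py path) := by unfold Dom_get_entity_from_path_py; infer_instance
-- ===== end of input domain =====

-- B replaces A's per-call scan over all 21 routes (a prefix comparison per route) by a dict built once,
-- keyed by each route's non-empty segment tuple, and two direct lookups (segments[:3], segments[:1]); objective: idiomatic.

-- ===== PORT A =====
-- hand port of s.rstrip("/") (PySem.Str has two-sided stripChars only): drop trailing '/' characters — exact
def pvRstripSlash (s : String) : String :=
  String.ofList ((s.toList.reverse.dropWhile (fun c => c == '/')).reverse)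

def pvPathMapping : List (String × String) :=
  [("/api/v1/equipos", "equipo"),
   ("/equipos", "equipo"),
   ("/api/v1/usuarios", "usuario"),
   ("/usuarios", "usuario"),
   ("/api/v1/alertas", "alerta"),
   ("/alertas", "alerta"),
   ("/api/v1/umbrales", "umbral"),
   ("/umbrales", "umbral"),
   ("/api/v1/mantenciones", "mantencion"),
   ("/mantenciones", "mantencion"),
   ("/api/v1/lecturas", "lectura"),
   ("/lecturas", "lectura"),
   ("/api/v1/predicciones", "prediccion"),
   ("/predicciones", "prediccion"),
   ("/api/v1/api-keys", "api_key"),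
   ("/api-keys", "api_key"),
   ("/api/v1/reportes", "reporte"),
   ("/reportes", "reporte"),
   ("/auth", "auth"),
   ("/api/v1/auth", "auth"),
   ("/api/v1/iot", "iot")]

-- the for-loop over path_mapping.items()
def pvLoopA (segments : List String) : List (String × String) → String × Option Int
  | [] => ("unknown", none)
  | (route, entityType) :: rest =>
    let routeSegments := ((PySem.Str.split? route "/").getD []).filter (fun seg => seg ≠ "")
    if PySem.List.slice segments none (some (routeSegments.length : Int)) = routeSegments then
      if routeSegments.length < segments.length then
        -- candidate = segments[len(route_segments)], in range here
        let candidate := (PySem.List.pyGet? segments (routeSegments.length : Int)).getD ""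
        match PySem.Int.ofStr? candidate with
        | some n => (entityType, some n)
        | none => (entityType, none)
      else (entityType, none)
    else pvLoopA segments rest

def get_entity_from_path_py (path : String) : String × Option Int :=
  let r := pvRstripSlash path
  let normalizedPath := if r = "" then "/" else r
  let segments := ((PySem.Str.split? normalizedPath "/").getD []).filter (fun seg => seg ≠ "")
  pvLoopA segments pvPathMapping

-- ===== PORT B =====
-- _INDEX: dict comprehension keyed by each route's non-empty segment list
def pvIndexB : PySem.Dict (List String) String :=
  pvPathMapping.foldl
    (fun d p => d.insert (((PySem.Str.split? p.1 "/").getD []).filter (fun seg => seg ≠ "")) p.2)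
    (PySem.Dict.mk [])

-- the for-loop over the two candidate keys
def pvTryKeys (segments : List String) : List (List String) → String × Option Int
  | [] => ("unknown", none)
  | key :: rest =>
    match pvIndexB.get? key with
    | some entity =>
      let k := key.length
      if k < segments.length then
        let candidate := (PySem.List.pyGet? segments (k : Int)).getD ""
        match PySem.Int.ofStr? candidate with
        | some n => (entity, some n)
        | none => (entity, none)
      else (entity, none)
    | none => pvTryKeys segments rest

def get_entity_from_path_py_alt (path : String) : String × Option Int :=
  let segments := ((PySem.Str.split? (pvRstripSlash path) "/").getD []).filter (fun seg => seg ≠ "")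
  pvTryKeys segments [PySem.List.slice segments none (some 3), PySem.List.slice segments none (some 1)]

-- ===== PRECONDITION & SPEC =====
def Spec_get_entity_from_path_py (path : String) (out : String × Option Int) : Prop := out = get_entity_from_path_py_alt path
instance (path : String) (out : String × Option Int) : Decidable (Spec_get_entity_from_path_py path out) := by unfold Spec_get_entity_from_path_py; infer_instance

-- ===== CLAIM (what is proved, stated in full; the proofs are below) =====
def Claim_equal_get_entity_from_path_py : Prop := ∀ (path : String), Dom_get_entity_from_path_py path → Spec_get_entity_from_path_py path (get_entity_from_path_py path)

-- ===== LEMMAS AND PROOFS =====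

-- common leaf: what both ports do once a route of k segments matched with entity e
def pvOut (e : String) (k : Nat) (segs : List String) : String × Option Int :=
  if k < segs.length then
    match PySem.Int.ofStr? ((PySem.List.pyGet? segs (k : Int)).getD "") with
    | some n => (e, some n)
    | none => (e, none)
  else (e, none)

-- A's loop over the literal route table, written out
def pvFA (segs : List String) : String × Option Int :=
  if PySem.List.slice segs none (some 3) = ["api", "v1", "equipos"] then pvOut "equipo" 3 segs
  else
  if PySem.List.slice segs none (some 1) = ["equipos"] then pvOut "equipo" 1 segs
  else
  if PySem.List.slice segs none (some 3) = ["api", "v1", "usuarios"] then pvOut "usuario" 3 segs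
  else
  if PySem.List.slice segs none (some 1) = ["usuarios"] then pvOut "usuario" 1 segs
  else
  if PySem.List.slice segs none (some 3) = ["api", "v1", "alertas"] then pvOut "alerta" 3 segs
  else
  if PySem.List.slice segs none (some 1) = ["alertas"] then pvOut "alerta" 1 segs
  else
  if PySem.List.slice segs none (some 3) = ["api", "v1", "umbrales"] then pvOut "umbral" 3 segs
  else
  if PySem.List.slice segs none (some 1) = ["umbrales"] then pvOut "umbral" 1 segs
  else
  if PySem.List.slice segs none (some 3) = ["api", "v1", "mantenciones"] then pvOut "mantencion" 3 segs
  else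
  if PySem.List.slice segs none (some 1) = ["mantenciones"] then pvOut "mantencion" 1 segs
  else
  if PySem.List.slice segs none (some 3) = ["api", "v1", "lecturas"] then pvOut "lectura" 3 segs
  else
  if PySem.List.slice segs none (some 1) = ["lecturas"] then pvOut "lectura" 1 segs
  else
  if PySem.List.slice segs none (some 3) = ["api", "v1", "predicciones"] then pvOut "prediccion" 3 segs
  else
  if PySem.List.slice segs none (some 1) = ["predicciones"] then pvOut "prediccion" 1 segs
  else
  if PySem.List.slice segs none (some 3) = ["api", "v1", "api-keys"] then pvOut "api_key" 3 segs
  else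
  if PySem.List.slice segs none (some 1) = ["api-keys"] then pvOut "api_key" 1 segs
  else
  if PySem.List.slice segs none (some 3) = ["api", "v1", "reportes"] then pvOut "reporte" 3 segs
  else
  if PySem.List.slice segs none (some 1) = ["reportes"] then pvOut "reporte" 1 segs
  else
  if PySem.List.slice segs none (some 1) = ["auth"] then pvOut "auth" 1 segs
  else
  if PySem.List.slice segs none (some 3) = ["api", "v1", "auth"] then pvOut "auth" 3 segs
  else
  if PySem.List.slice segs none (some 3) = ["api", "v1", "iot"] then pvOut "iot" 3 segs
  else ("unknown", none)

-- B's two lookups, written out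
def pvFB (segs : List String) : String × Option Int :=
  match pvIndexB.get? (PySem.List.slice segs none (some 3)) with
  | some e => pvOut e (PySem.List.slice segs none (some 3)).length segs
  | none =>
    match pvIndexB.get? (PySem.List.slice segs none (some 1)) with
    | some e => pvOut e (PySem.List.slice segs none (some 1)).length segs
    | none => ("unknown", none)

lemma pvIndexB_eq : pvIndexB = PySem.Dict.mk
    [(["api", "v1", "equipos"], "equipo"),
     (["equipos"], "equipo"),
     (["api", "v1", "usuarios"], "usuario"),
     (["usuarios"], "usuario"),
     (["api", "v1", "alertas"], "alerta"),
     (["alertas"], "alerta"),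
     (["api", "v1", "umbrales"], "umbral"),
     (["umbrales"], "umbral"),
     (["api", "v1", "mantenciones"], "mantencion"),
     (["mantenciones"], "mantencion"),
     (["api", "v1", "lecturas"], "lectura"),
     (["lecturas"], "lectura"),
     (["api", "v1", "predicciones"], "prediccion"),
     (["predicciones"], "prediccion"),
     (["api", "v1", "api-keys"], "api_key"),
     (["api-keys"], "api_key"),
     (["api", "v1", "reportes"], "reporte"),
     (["reportes"], "reporte"),
     (["auth"], "auth"),
     (["api", "v1", "auth"], "auth"),
     (["api", "v1", "iot"], "iot")] := by rfl

lemma loopA_eq (segs : List String) : pvLoopA segs pvPathMapping = pvFA segs := rfl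

lemma tryKeys_eq (segs : List String) :
    pvTryKeys segs [PySem.List.slice segs none (some 3), PySem.List.slice segs none (some 1)] = pvFB segs := rfl

lemma slice3_take (xs : List String) : PySem.List.slice xs none (some 3) = xs.take 3 := by
  rw [PySem.List.slice_to xs (by norm_num)]; rfl

lemma slice1_take (xs : List String) : PySem.List.slice xs none (some 1) = xs.take 1 := by
  rw [PySem.List.slice_to xs (by norm_num)]; rfl

lemma get?_nil_dict (k : List String) :
    (PySem.Dict.mk ([] : List (List String × String))).get? k = none := rfl

set_option maxHeartbeats 3000000 in
lemma core (segs : List String) : pvFA segs = pvFB segs := by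
  rcases segs with _ | ⟨a, _ | ⟨b, _ | ⟨c, rest⟩⟩⟩
  · decide
  · have t3 : List.take 3 [a] = [a] := rfl
    have t1 : List.take 1 [a] = [a] := rfl
    simp only [pvFA, pvFB, pvIndexB_eq, PySem.Dict.get?_mk_cons, get?_nil_dict, slice3_take, slice1_take,
      beq_iff_eq, t3, t1, List.cons.injEq, List.cons_ne_nil, reduceCtorEq, and_false, false_and, and_true,
      if_false, List.length_cons, List.length_nil, eq_comm (a := a)]
    split_ifs <;> simp_all [get?_nil_dict]
  · have t3 : List.take 3 [a, b] = [a, b] := rfl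
    have t1 : List.take 1 [a, b] = [a] := rfl
    simp only [pvFA, pvFB, pvIndexB_eq, PySem.Dict.get?_mk_cons, get?_nil_dict, slice3_take, slice1_take,
      beq_iff_eq, t3, t1, List.cons.injEq, List.cons_ne_nil, reduceCtorEq, and_false, false_and, and_true,
      if_false, List.length_cons, List.length_nil, eq_comm (a := a), eq_comm (a := b)]
    split_ifs <;> simp_all [get?_nil_dict]
  · have t3 : List.take 3 (a :: b :: c :: rest) = [a, b, c] := rfl
    have t1 : List.take 1 (a :: b :: c :: rest) = [a] := rfl
    simp only [pvFA, pvFB, pvIndexB_eq, PySem.Dict.get?_mk_cons, get?_nil_dict, slice3_take,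
      slice1_take, beq_iff_eq, t3, t1, List.cons.injEq, List.cons_ne_nil, reduceCtorEq, and_false,
      false_and, and_true, if_false, List.length_cons, List.length_nil, eq_comm (a := a),
      eq_comm (a := b), eq_comm (a := c)]
    by_cases ha : "api" = a
    case neg => simp_all <;> try (split_ifs <;> simp_all)
    subst ha
    by_cases hb : "v1" = b
    case neg => simp_all
    subst hb
    by_cases h_equipos : "equipos" = c
    case pos => subst h_equipos; simp
    by_cases h_usuarios : "usuarios" = c
    case pos => subst h_usuarios; simp
    by_cases h_alertas : "alertas" = c
    case pos => subst h_alertas; simp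
    by_cases h_umbrales : "umbrales" = c
    case pos => subst h_umbrales; simp
    by_cases h_mantenciones : "mantenciones" = c
    case pos => subst h_mantenciones; simp
    by_cases h_lecturas : "lecturas" = c
    case pos => subst h_lecturas; simp
    by_cases h_predicciones : "predicciones" = c
    case pos => subst h_predicciones; simp
    by_cases h_api_keys : "api-keys" = c
    case pos => subst h_api_keys; simp
    by_cases h_reportes : "reportes" = c
    case pos => subst h_reportes; simp
    by_cases h_auth : "auth" = c
    case pos => subst h_auth; simp
    by_cases h_iot : "iot" = c
    case pos => subst h_iot; simp
    simp_all

-- ===== VERDICT (by name: the statement is the Claim_ definition above) =====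
theorem get_entity_from_path_py_spec : Claim_equal_get_entity_from_path_py := by
  intro path _
  show get_entity_from_path_py path = get_entity_from_path_py_alt path
  by_cases h : pvRstripSlash path = ""
  · simp only [get_entity_from_path_py, get_entity_from_path_py_alt, h, if_pos]
    decide
  · simp only [get_entity_from_path_py, get_entity_from_path_py_alt, if_neg h]
    rw [loopA_eq, tryKeys_eq]
    exact core _
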